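-- pv_equiv track=rewrite | github.com/pypi-data/pypi-mirror-40 | packages/ops-channel/ops_channel-0.0.8.tar.gz/ops_channel-0.0.8/ops_channel/cli.py | getopt
-- ===== SOURCE A (Python) =====
-- def getopt(inputs):
--     def ptype(input):
--         if input == "":
--             return (0,"")
--         if "-" == input[0] and len(input) == 2:
--             return (1,input[1])
--         if "--" == input[:2] and len(input) >= 4:
--             return (2,input[2:])
--         return (0,"")
--     def istype(input):
--         if len(input) <= 0:
--             return 0
--         if "-" == input[0]:
--             return 1
--         return 0
--     ret = {}
--     ret['__ctrl__']=''
--     ret['__func__']=''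
--     u = 0
--     ucount = len(inputs)
--     icount = 0
--     ls = []
--     if ucount >= 1:
--         while 1:
--             if u >= ucount:
--                 break
--             if istype(inputs[u]) == 1:
--                 break
--
--             ls.append(inputs[u])
--             u += 1
--
--         inputs = inputs[u:]
--         icount = len(inputs)
--
--     if icount >= 1:
--         i = 0
--         state = 0
--         while 1:
--             t,name = ptype(inputs[i])
--             for c in range(1):
--                 if t == 0 :
--                     i += 1
--                     break
--                 if i+1 < icount:
--                     tt,tname = ptype(inputs[i+1])
--                     if tt != 0:
--                         ret[name] = ""
--                         i += 1
--                         break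
--                     ret[name] = inputs[i+1]
--                     i += 2
--                     break
--                 ret[name] = ""
--                 i += 1
--                 break
--             if i >= icount:
--                 break
--     if len(ls)==2:
--         ret['__ctrl__']=ls[0]
--         ret['__func__']=ls[1]
--     elif len(ls)==1:
--         ret['__ctrl__']=''
--         ret['__func__']=ls[0]
--     return (ret)
-- ===== SOURCE B (Python) =====
-- def getopt(inputs):
--     def ptype(tok):
--         if len(tok) == 2 and tok[0] == "-":
--             return tok[1]
--         if tok[:2] == "--" and len(tok) >= 4:
--             return tok[2:]
--         return None
--
--     split = next((i for i, t in enumerate(inputs) if t[:1] == "-"), len(inputs))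
--     ls, opts = inputs[:split], inputs[split:]
--     ret = {'__ctrl__': '', '__func__': ''}
--     pending = None
--     for tok in opts:
--         name = ptype(tok)
--         if name is not None:
--             if pending is not None:
--                 ret[pending] = ""
--             pending = name
--         elif pending is not None:
--             ret[pending] = tok
--             pending = None
--     if pending is not None:
--         ret[pending] = ""
--     if len(ls) == 2:
--         ret['__ctrl__'], ret['__func__'] = ls
--     elif len(ls) == 1:
--         ret['__ctrl__'], ret['__func__'] = '', ls[0]
--     return ret
-- ===== Notes on version B (the rewrite author's own statement) =====
-- stated objective: simpler
-- what changed: Replaces A's index-based while loop with a lookahead (peeking at inputs[i+1] and jumping i by 1 or 2) by a single forward pass that maintains a 'pending' option name flushed to "" when another option or the end follows, and replaces the index-walking prefix scan by a split at the first dash-token.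
import Mathlib
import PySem

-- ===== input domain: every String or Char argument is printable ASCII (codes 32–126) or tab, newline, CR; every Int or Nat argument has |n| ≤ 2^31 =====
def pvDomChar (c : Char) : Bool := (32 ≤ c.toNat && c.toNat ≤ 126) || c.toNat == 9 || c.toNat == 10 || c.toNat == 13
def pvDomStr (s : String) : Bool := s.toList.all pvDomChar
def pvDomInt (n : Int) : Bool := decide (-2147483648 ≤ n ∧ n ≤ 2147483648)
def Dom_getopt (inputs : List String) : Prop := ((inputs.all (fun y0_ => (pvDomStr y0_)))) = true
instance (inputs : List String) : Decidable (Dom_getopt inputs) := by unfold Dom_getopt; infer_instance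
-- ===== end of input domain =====

-- B replaces A's index/lookahead option loop by a single pass carrying a pending option name,
-- and the index-walking prefix scan by a split at the first dash-token (objective: simpler).


-- ===== PORT A =====
-- ptype: ("" → (0,"")) ; ("-x" → (1,"x")) ; ("--nn…" len ≥ 4 → (2,tail)) ; else (0,"")
def ptA (s : String) : Int × String :=
  if s.toList = [] then (0, "")
  else if PySem.List.pyGet? s.toList 0 = some '-' ∧ s.toList.length = 2 then
    -- input[1]; the none branch is unreachable (length = 2)
    match PySem.List.pyGet? s.toList 1 with
    | some c => (1, String.ofList [c])
    | none => (0, "")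
  else if PySem.List.slice s.toList none (some 2) = ['-', '-'] ∧ 4 ≤ s.toList.length then
    (2, String.ofList (PySem.List.slice s.toList (some 2) none))
  else (0, "")

def istA (s : String) : Int :=
  if s.toList.length ≤ 0 then 0
  else if PySem.List.pyGet? s.toList 0 = some '-' then 1 else 0

-- the leading while loop: collect tokens into ls until istype == 1, keep the remainder
def spanA : List String → List String × List String
  | [] => ([], [])
  | x :: xs =>
    if istA x = 1 then ([], x :: xs)
    else
      let p := spanA xs
      (x :: p.1, p.2)

-- the option while loop over inputs[i:], with the i+1 lookahead; i ↦ the remaining list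
def loopA : List String → PySem.Dict String String → PySem.Dict String String
  | [], ret => ret
  | x :: rest, ret =>
    let tn := ptA x
    if tn.1 = 0 then loopA rest ret
    else
      match rest with
      | [] => ret.insert tn.2 ""            -- no i+1: ret[name] = ""
      | y :: rest' =>
        if (ptA y).1 ≠ 0 then loopA (y :: rest') (ret.insert tn.2 "")   -- next is an option
        else loopA rest' (ret.insert tn.2 y)                            -- consume the value

def getopt (inputs : List String) : List (String × String) :=
  let ret0 : PySem.Dict String String :=
    (PySem.Dict.empty.insert "__ctrl__" "").insert "__func__" ""
  let p := spanA inputs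
  let ret := loopA p.2 ret0
  (match p.1 with
   | [a, b] => (ret.insert "__ctrl__" a).insert "__func__" b
   | [a] => (ret.insert "__ctrl__" "").insert "__func__" a
   | _ => ret).items

-- ===== PORT B =====
-- ptype merged into an Option: some name if the token is an option, none otherwise
def ptB (s : String) : Option String :=
  if s.toList.length = 2 ∧ PySem.List.pyGet? s.toList 0 = some '-' then
    (PySem.List.pyGet? s.toList 1).map (fun c => String.ofList [c])
  else if PySem.List.slice s.toList none (some 2) = ['-', '-'] ∧ 4 ≤ s.toList.length then
    some (String.ofList (PySem.List.slice s.toList (some 2) none))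
  else none

-- single forward pass carrying the pending option name; a trailing pending is flushed to ""
def loopB : List String → Option String → PySem.Dict String String → PySem.Dict String String
  | [], pending, ret =>
    match pending with
    | some p => ret.insert p ""
    | none => ret
  | x :: rest, pending, ret =>
    match ptB x with
    | some name =>
      loopB rest (some name)
        (match pending with
         | some p => ret.insert p ""
         | none => ret)
    | none =>
      match pending with
      | some p => loopB rest none (ret.insert p x)
      | none => loopB rest none ret

def getopt_alt (inputs : List String) : List (String × String) :=
  let split := inputs.findIdx (fun t => PySem.List.slice t.toList none (some 1) == ['-'])
  let ls := inputs.take split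
  let opts := inputs.drop split
  let ret0 : PySem.Dict String String :=
    (PySem.Dict.empty.insert "__ctrl__" "").insert "__func__" ""
  let ret := loopB opts none ret0
  -- B's len(ls)==2 / ==1 branches; getD is a totality guard (in range under the length test)
  (if ls.length = 2 then (ret.insert "__ctrl__" (ls.getD 0 "")).insert "__func__" (ls.getD 1 "")
   else if ls.length = 1 then (ret.insert "__ctrl__" "").insert "__func__" (ls.getD 0 "")
   else ret).items

-- ===== PRECONDITION & SPEC =====
def Spec_getopt (inputs : List String) (out : List (String × String)) : Prop := out = getopt_alt inputs
instance (inputs : List String) (out : List (String × String)) : Decidable (Spec_getopt inputs out) := by unfold Spec_getopt; infer_instance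

-- ===== CLAIM (what is proved, stated in full; the proofs are below) =====
def Claim_equal_getopt : Prop := ∀ (inputs : List String), Dom_getopt inputs → Spec_getopt inputs (getopt inputs)

-- ===== LEMMAS AND PROOFS =====

-- B's dash test agrees with A's istype
lemma ist_eq_dash (s : String) :
    (PySem.List.slice s.toList none (some 1) == ['-']) = (istA s = 1 : Bool) := by
  unfold istA
  rw [show ((1 : Int) = ((1 : Nat) : Int)) from rfl, PySem.List.slice_to_natCast]
  cases h : s.toList with
  | nil => simp
  | cons c cs => by_cases hc : c = '-' <;> simp [hc]

-- A's prefix scan is B's take/drop at the first dash-token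
lemma spanA_eq (inputs : List String) :
    spanA inputs =
      (inputs.take (inputs.findIdx (fun t => PySem.List.slice t.toList none (some 1) == ['-'])),
       inputs.drop (inputs.findIdx (fun t => PySem.List.slice t.toList none (some 1) == ['-']))) := by
  induction inputs with
  | nil => simp [spanA]
  | cons x xs ih =>
    rw [List.findIdx_cons, ist_eq_dash]
    by_cases h : istA x = 1
    · simp [spanA, h]
    · simp [spanA, h, ih]

-- B's classifier in terms of A's
lemma ptB_eq_ptA (s : String) :
    ptB s = if (ptA s).1 = 0 then none else some (ptA s).2 := by
  by_cases h0 : s.toList = []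
  · have hA : ptA s = (0, "") := by unfold ptA; rw [if_pos h0]
    have hB : ptB s = none := by
      unfold ptB
      rw [if_neg (by simp [h0]), if_neg (by simp [h0, PySem.List.slice])]
    rw [hA, hB]; simp
  · by_cases h1 : PySem.List.pyGet? s.toList 0 = some '-' ∧ s.toList.length = 2
    · obtain ⟨c, hc⟩ : ∃ c, PySem.List.pyGet? s.toList 1 = some c := by
        rw [show ((1 : Int) = ((1 : Nat) : Int)) from rfl, PySem.List.pyGet?_natCast]
        exact ⟨_, List.getElem?_eq_getElem (by omega)⟩
      have hA : ptA s = (1, String.ofList [c]) := by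
        unfold ptA; rw [if_neg h0, if_pos h1, hc]
      have hB : ptB s = some (String.ofList [c]) := by
        unfold ptB; rw [if_pos ⟨h1.2, h1.1⟩, hc]; rfl
      rw [hA, hB]; simp
    · have h1' : ¬ (s.toList.length = 2 ∧ PySem.List.pyGet? s.toList 0 = some '-') := by
        intro ⟨a, b⟩; exact h1 ⟨b, a⟩
      by_cases h2 : PySem.List.slice s.toList none (some 2) = ['-', '-'] ∧ 4 ≤ s.toList.length
      · have hA : ptA s = (2, String.ofList (PySem.List.slice s.toList (some 2) none)) := by
          unfold ptA; rw [if_neg h0, if_neg h1, if_pos h2]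
        have hB : ptB s = some (String.ofList (PySem.List.slice s.toList (some 2) none)) := by
          unfold ptB; rw [if_neg h1', if_pos h2]
        rw [hA, hB]; simp
      · have hA : ptA s = (0, "") := by
          unfold ptA; rw [if_neg h0, if_neg h1, if_neg h2]
        have hB : ptB s = none := by
          unfold ptB; rw [if_neg h1', if_neg h2]
        rw [hA, hB]; simp

-- one-step unfolding lemmas for the two loops
lemma loopA_one (x : String) (ret : PySem.Dict String String) :
    loopA [x] ret = if (ptA x).1 = 0 then loopA [] ret else ret.insert (ptA x).2 "" := by
  rw [loopA.eq_def]

lemma loopA_cons2 (x y : String) (rest' : List String) (ret : PySem.Dict String String) :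
    loopA (x :: y :: rest') ret =
      if (ptA x).1 = 0 then loopA (y :: rest') ret
      else
        if (ptA y).1 ≠ 0 then loopA (y :: rest') (ret.insert (ptA x).2 "")
        else loopA rest' (ret.insert (ptA x).2 y) := by
  rw [loopA.eq_def]

lemma loopB_cons (x : String) (rest : List String) (pending : Option String)
    (ret : PySem.Dict String String) :
    loopB (x :: rest) pending ret =
      match ptB x with
      | some name =>
        loopB rest (some name)
          (match pending with
           | some p => ret.insert p ""
           | none => ret)
      | none =>
        match pending with
        | some p => loopB rest none (ret.insert p x)
        | none => loopB rest none ret := by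
  rw [loopB.eq_def]

-- the core: A's lookahead loop equals B's pending-state loop (length induction,
-- since A consumes two tokens when an option takes a value)
lemma loop_eq (n : Nat) : ∀ (xs : List String), xs.length ≤ n →
    ∀ ret, loopA xs ret = loopB xs none ret := by
  induction n with
  | zero =>
    intro xs h ret
    have hx : xs = [] := List.eq_nil_of_length_eq_zero (Nat.le_zero.mp h)
    subst hx; rfl
  | succ n ih =>
    intro xs h ret
    match xs with
    | [] => rfl
    | [x] =>
      rw [loopA_one, loopB_cons, ptB_eq_ptA]
      by_cases hx : (ptA x).1 = 0
      · rw [if_pos hx, if_pos hx]; rfl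
      · rw [if_neg hx, if_neg hx]; rfl
    | x :: y :: rest' =>
      rw [loopA_cons2, loopB_cons, ptB_eq_ptA]
      by_cases hx : (ptA x).1 = 0
      · rw [if_pos hx, if_pos hx]
        exact ih (y :: rest') (by simp at h ⊢; omega) ret
      · rw [if_neg hx, if_neg hx]
        by_cases hy : (ptA y).1 = 0
        · -- next token is a value: A consumes two, B assigns the pending
          rw [if_neg (by simp [hy]),
              ih rest' (by simp at h; omega) (ret.insert (ptA x).2 y)]
          show _ = loopB (y :: rest') (some (ptA x).2) ret
          rw [loopB_cons, ptB_eq_ptA, if_pos hy]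
        · -- next token is an option: A flushes name to "", B flushes pending
          rw [if_pos hy,
              ih (y :: rest') (by simp at h ⊢; omega) (ret.insert (ptA x).2 "")]
          show _ = loopB (y :: rest') (some (ptA x).2) ret
          rw [loopB_cons, loopB_cons, ptB_eq_ptA, if_neg hy]

lemma loopAB (xs : List String) (ret : PySem.Dict String String) :
    loopA xs ret = loopB xs none ret :=
  loop_eq xs.length xs le_rfl ret

-- ===== VERDICT (by name: the statement is the Claim_ definition above) =====
theorem getopt_spec : Claim_equal_getopt := by
  intro inputs _
  unfold Spec_getopt getopt getopt_alt
  simp only [spanA_eq, loopAB]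
  generalize (List.take _ inputs) = ls
  match ls with
  | [] => rfl
  | [_] => rfl
  | [_, _] => rfl
  | _ :: _ :: _ :: t =>
    rw [if_neg (by simp), if_neg (by simp)]
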